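-- pv_equiv track=rewrite | github.com/DailyForkCast/osint-foresight | scripts/process_openalex_china.py | classify_china_involvement
-- ===== SOURCE A (Python) =====
-- def classify_china_involvement(data):
--     # Classify the type of China involvement
--     china_institutions = 0
--     total_institutions = 0
--
--     for authorship in data.get('authorships', []):
--         for inst in authorship.get('institutions', []):
--             total_institutions += 1
--             if inst.get('country_code') == 'CN':
--                 china_institutions += 1
--
--     if china_institutions == 0:
--         return 'indirect'
--     elif china_institutions == total_institutions:
--         return 'china_only'
--     else:
--         return 'collaboration'
-- ===== SOURCE B (Python) =====
-- def classify_china_involvement(data):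
--     # Collect the distinct country codes (possibly including None) in one pass,
--     # then classify by set membership/equality instead of counters.
--     codes = set()
--     for authorship in data.get('authorships', []):
--         for inst in authorship.get('institutions', []):
--             codes.add(inst.get('country_code'))
--     if 'CN' not in codes:
--         return 'indirect'
--     if codes == {'CN'}:
--         return 'china_only'
--     return 'collaboration'
-- ===== Notes on version B (the rewrite author's own statement) =====
-- stated objective: idiomatic
-- what changed: B maintains a set of distinct country codes instead of two integer counters, and decides after the loop by set membership ('CN' not in codes) and set equality (codes == {'CN'}) rather than by comparing counts.
import Mathlib
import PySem

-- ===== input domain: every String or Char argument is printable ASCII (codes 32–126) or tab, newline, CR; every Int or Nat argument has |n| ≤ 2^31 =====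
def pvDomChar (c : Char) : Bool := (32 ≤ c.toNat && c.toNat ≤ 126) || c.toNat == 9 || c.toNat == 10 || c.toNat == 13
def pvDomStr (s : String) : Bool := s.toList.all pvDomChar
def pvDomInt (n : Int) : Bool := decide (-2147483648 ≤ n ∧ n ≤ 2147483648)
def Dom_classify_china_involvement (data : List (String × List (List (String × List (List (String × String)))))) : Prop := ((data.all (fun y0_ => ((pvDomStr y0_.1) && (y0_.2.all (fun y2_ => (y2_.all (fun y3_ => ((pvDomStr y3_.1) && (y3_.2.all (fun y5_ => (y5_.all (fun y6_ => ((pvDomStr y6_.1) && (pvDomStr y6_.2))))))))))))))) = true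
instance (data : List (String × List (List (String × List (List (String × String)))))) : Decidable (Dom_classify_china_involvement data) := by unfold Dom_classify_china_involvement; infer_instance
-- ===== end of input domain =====

-- B replaces A's two integer counters by a set of the distinct country codes and
-- classifies by set membership/equality after the loop (idiomatic; same cost).

-- ===== PORT A =====
def classify_china_involvement (data : List (String × List (List (String × List (List (String × String)))))) : String :=
  let counts : Int × Int :=
    (PySem.Dict.getD ⟨data⟩ "authorships" []).foldl (fun acc authorship =>
      (PySem.Dict.getD ⟨authorship⟩ "institutions" []).foldl (fun (acc : Int × Int) inst =>
        let total := acc.2 + 1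
        let china := if PySem.Dict.get? ⟨inst⟩ "country_code" == some "CN" then acc.1 + 1 else acc.1
        (china, total)) acc) (0, 0)
  if counts.1 = 0 then "indirect"
  else if counts.1 = counts.2 then "china_only"
  else "collaboration"

-- ===== PORT B =====
def classify_china_involvement_alt (data : List (String × List (List (String × List (List (String × String)))))) : String :=
  let codes : PySem.Set (Option String) :=
    (PySem.Dict.getD ⟨data⟩ "authorships" []).foldl (fun codes authorship =>
      (PySem.Dict.getD ⟨authorship⟩ "institutions" []).foldl (fun codes inst =>
        PySem.Set.add codes (PySem.Dict.get? ⟨inst⟩ "country_code")) codes) PySem.Set.empty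
  if ¬ (PySem.Set.contains codes (some "CN") = true) then "indirect"
  else if PySem.Set.equal codes (PySem.Set.ofList [some "CN"]) then "china_only"
  else "collaboration"

-- ===== PRECONDITION & SPEC =====
def Spec_classify_china_involvement (data : List (String × List (List (String × List (List (String × String)))))) (out : String) : Prop := out = classify_china_involvement_alt data
instance (data : List (String × List (List (String × List (List (String × String)))))) (out : String) : Decidable (Spec_classify_china_involvement data out) := by unfold Spec_classify_china_involvement; infer_instance

-- ===== CLAIM (what is proved, stated in full; the proofs are below) =====
def Claim_equal_classify_china_involvement : Prop := ∀ (data : List (String × List (List (String × List (List (String × String)))))), Dom_classify_china_involvement data → Spec_classify_china_involvement data (classify_china_involvement data)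

-- ===== LEMMAS AND PROOFS =====

-- nested foldl = foldl over the flattened list
theorem pv_foldl_nested {α β γ : Type} (g : β → List α) (f : γ → α → γ) :
    ∀ (l : List β) (init : γ),
      l.foldl (fun acc b => (g b).foldl f acc) init = (l.flatMap g).foldl f init := by
  intro l
  induction l with
  | nil => intro init; rfl
  | cons b l ih =>
      intro init
      simp [List.flatMap_cons, List.foldl_append, ih]

def pvCode (inst : List (String × String)) : Option String := PySem.Dict.get? ⟨inst⟩ "country_code"

theorem pv_countA (xs : List (List (String × String))) :
    ∀ (c t : Int),
      xs.foldl (fun (acc : Int × Int) inst =>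
        let total := acc.2 + 1
        let china := if PySem.Dict.get? ⟨inst⟩ "country_code" == some "CN" then acc.1 + 1 else acc.1
        (china, total)) (c, t)
      = (c + ((xs.map pvCode).count (some "CN") : Int), t + ((xs.map pvCode).length : Int)) := by
  induction xs with
  | nil => intro c t; simp
  | cons x xs ih =>
      intro c t
      simp only [List.foldl_cons, List.map_cons, List.length_cons, ih]
      by_cases h : PySem.Dict.get? (⟨x⟩ : PySem.Dict String String) "country_code" = some "CN"
      · simp [pvCode, h]
        constructor <;> ring
      · simp [pvCode, h]
        ring

theorem pv_setB (xs : List (List (String × String))) (s : PySem.Set (Option String)) :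
    xs.foldl (fun codes inst => PySem.Set.add codes (PySem.Dict.get? ⟨inst⟩ "country_code")) s
      = PySem.Set.update s (xs.map pvCode) := by
  rw [PySem.Set.update_map_eq_foldl_add]
  rfl

theorem pv_main (ys : List (Option String)) :
    (if ((ys.count (some "CN") : Int)) = 0 then "indirect"
     else if ((ys.count (some "CN") : Int)) = (ys.length : Int) then "china_only"
     else "collaboration")
    = (if ¬ (PySem.Set.contains (PySem.Set.ofList ys) (some "CN") = true) then "indirect"
       else if PySem.Set.equal (PySem.Set.ofList ys) (PySem.Set.ofList [some "CN"]) then "china_only"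
       else "collaboration") := by
  by_cases hmem : (some "CN") ∈ ys
  · have hc : ¬ ((ys.count (some "CN") : Int)) = 0 := by
      have := List.count_pos_iff.mpr hmem
      omega
    have hcon : PySem.Set.contains (PySem.Set.ofList ys) (some "CN") = true := by
      rw [PySem.Set.contains_iff, PySem.Set.mem_ofList]; exact hmem
    by_cases hall : ∀ b ∈ ys, b = some "CN"
    · have hcnt : ys.count (some "CN") = ys.length :=
        List.count_eq_length.mpr (fun b hb => ((hall b hb).symm))
      have heq : PySem.Set.equal (PySem.Set.ofList ys) (PySem.Set.ofList [some "CN"]) = true := by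
        rw [PySem.Set.equal_iff]
        intro x
        simp only [PySem.Set.mem_ofList, List.mem_singleton]
        constructor
        · intro hx; exact hall x hx
        · intro hx; subst hx; exact hmem
      rw [if_neg hc, if_pos (by exact_mod_cast hcnt),
          if_neg (not_not_intro hcon), if_pos heq]
    · have hall' : ∃ b ∈ ys, b ≠ some "CN" := by
        by_contra hcon2
        exact hall fun b hb => by
          by_contra hne
          exact hcon2 ⟨b, hb, hne⟩
      obtain ⟨b, hb, hbne⟩ := hall'
      have hcnt : ys.count (some "CN") ≠ ys.length := by
        intro h
        exact hbne ((List.count_eq_length.mp h b hb).symm)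
      have heq : ¬ PySem.Set.equal (PySem.Set.ofList ys) (PySem.Set.ofList [some "CN"]) = true := by
        rw [PySem.Set.equal_iff]
        intro h
        have := (h b).mp (by rw [PySem.Set.mem_ofList]; exact hb)
        rw [PySem.Set.mem_ofList, List.mem_singleton] at this
        exact hbne this
      rw [if_neg hc, if_neg (by exact_mod_cast hcnt),
          if_neg (not_not_intro hcon), if_neg heq]
  · have hc : ys.count (some "CN") = 0 := List.count_eq_zero.mpr hmem
    have hcon : ¬ PySem.Set.contains (PySem.Set.ofList ys) (some "CN") = true := by
      rw [PySem.Set.contains_iff, PySem.Set.mem_ofList]; exact hmem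
    rw [if_pos (by exact_mod_cast hc), if_pos hcon]

-- ===== VERDICT (by name: the statement is the Claim_ definition above) =====
theorem classify_china_involvement_spec : Claim_equal_classify_china_involvement := by
  intro data _
  unfold Spec_classify_china_involvement classify_china_involvement classify_china_involvement_alt
  rw [pv_foldl_nested, pv_foldl_nested, pv_countA, pv_setB]
  simp only [zero_add]
  exact pv_main _
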